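-- pv_equiv track=rewrite | github.com/alexandrediasldev/PBSreader | Parser.py | parse_pokemon_move
-- ===== SOURCE A (Python) =====
-- def parse_pokemon_move(moves):
--     moves_and_level = moves.split(",")
--     level_moves = []
--     for i in range(0, len(moves_and_level), 2):
--         level = moves_and_level[i]
--         if i + 1 < len(moves_and_level):
--             move = moves_and_level[i + 1]
--             level_moves.append((level, move))
--     return level_moves
-- ===== SOURCE B (Python) =====
-- def parse_pokemon_move(moves):
--     moves_and_level = moves.split(",")
--     return list(zip(moves_and_level[::2], moves_and_level[1::2]))
-- ===== Notes on version B (the rewrite author's own statement) =====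
-- stated objective: idiomatic
-- what changed: Replaces the explicit index loop with bounds checks by zipping the even-index and odd-index slices, letting zip's truncation drop a trailing unpaired element.
import Mathlib
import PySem

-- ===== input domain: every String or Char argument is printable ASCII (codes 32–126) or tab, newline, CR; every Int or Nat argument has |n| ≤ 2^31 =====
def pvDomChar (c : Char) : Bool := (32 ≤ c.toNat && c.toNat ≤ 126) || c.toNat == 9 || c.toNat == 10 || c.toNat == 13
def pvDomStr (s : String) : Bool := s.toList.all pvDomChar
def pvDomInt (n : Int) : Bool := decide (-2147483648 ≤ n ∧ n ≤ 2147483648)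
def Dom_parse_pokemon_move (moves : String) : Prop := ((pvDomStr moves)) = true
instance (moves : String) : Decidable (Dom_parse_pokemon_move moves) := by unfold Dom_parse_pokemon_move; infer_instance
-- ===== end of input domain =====

-- B pairs the even-index and odd-index comma slices with zip instead of an index loop (idiomatic; same output).

-- ===== PORT A =====
-- the body of A's `for i in range(0, len(moves_and_level), 2)` loop
def pvBodyA (mal : List String) (acc : List (String × String)) (i : Int) : List (String × String) :=
  match PySem.List.pyGet? mal i with
  | none => acc          -- unreachable: i is drawn from range(0, len, 2)
  | some level =>
    if i + 1 < (mal.length : Int) then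
      match PySem.List.pyGet? mal (i + 1) with
      | none => acc      -- unreachable: i + 1 < len
      | some move => acc ++ [(level, move)]
    else acc

def parse_pokemon_move (moves : String) : List (String × String) :=
  let mal := (PySem.Str.split? moves ",").getD []   -- sep "," is nonempty, so split? is always `some`
  (PySem.List.pyRange 0 (mal.length : Int) 2).foldl (pvBodyA mal) []

-- ===== PORT B =====
def parse_pokemon_move_alt (moves : String) : List (String × String) :=
  let mal := (PySem.Str.split? moves ",").getD []   -- sep "," is nonempty, so split? is always `some`
  List.zip ((PySem.List.slice? mal none none 2).getD [])
           ((PySem.List.slice? mal (some 1) none 2).getD [])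

-- ===== PRECONDITION & SPEC =====
def Spec_parse_pokemon_move (moves : String) (out : List (String × String)) : Prop := out = parse_pokemon_move_alt moves
instance (moves : String) (out : List (String × String)) : Decidable (Spec_parse_pokemon_move moves out) := by unfold Spec_parse_pokemon_move; infer_instance

-- ===== CLAIM (what is proved, stated in full; the proofs are below) =====
def Claim_equal_parse_pokemon_move : Prop := ∀ (moves : String), Dom_parse_pokemon_move moves → Spec_parse_pokemon_move moves (parse_pokemon_move moves)

-- ===== LEMMAS AND PROOFS =====

-- the even-index elements l[::2]
def pvEvens {α : Type} : List α → List α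
  | [] => []
  | x :: s => x :: pvEvens s.tail
termination_by l => l.length
decreasing_by simp [List.length_tail]

theorem pvEvens_nil {α : Type} : pvEvens ([] : List α) = [] := by rw [pvEvens.eq_def]
theorem pvEvens_cons {α : Type} (x : α) (s : List α) : pvEvens (x :: s) = x :: pvEvens s.tail := by
  rw [pvEvens.eq_def]

-- consecutive pairs (l[0],l[1]), (l[2],l[3]), …, dropping a trailing unpaired element
def pvPairs {α : Type} : List α → List (α × α)
  | x :: y :: t => (x, y) :: pvPairs t
  | _ => []

theorem pvEvens_filterMap {α : Type} (l : List α) :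
    List.filterMap (fun k => l[2 * k]?) (List.range ((l.length + 1) / 2)) = pvEvens l := by
  match l with
  | [] => simp [pvEvens_nil]
  | x :: s =>
    have hc : (( (x :: s).length + 1) / 2) = (s.tail.length + 1) / 2 + 1 := by
      simp [List.length_tail]; omega
    rw [hc, List.range_succ_eq_map, List.filterMap_cons]
    have h0 : (x :: s)[2 * 0]? = some x := by simp
    rw [h0, List.filterMap_map]
    have hrest : List.filterMap ((fun k => (x :: s)[2 * k]?) ∘ Nat.succ) (List.range ((s.tail.length + 1) / 2))
        = List.filterMap (fun k => s.tail[2 * k]?) (List.range ((s.tail.length + 1) / 2)) := by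
      apply List.filterMap_congr
      intro k _
      have h2 : 2 * (k + 1) = (2 * k + 1) + 1 := by omega
      simp [Function.comp, h2, List.getElem?_tail]
    rw [hrest, pvEvens_filterMap s.tail, pvEvens_cons]
termination_by l.length
decreasing_by simp [List.length_tail]

theorem pvSlice_evens {α : Type} (l : List α) :
    PySem.List.slice? l none none 2 = some (pvEvens l) := by
  rw [PySem.List.slice?, PySem.List.sliceIndices]
  simp only [if_neg (by norm_num : ¬ (2:Int) = 0)]
  norm_num
  have hsplit : (if 0 < l.length then (((l.length : Int) + 2 - 1) / 2).toNat else 0)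
      = (l.length + 1) / 2 := by
    split <;> omega
  rw [hsplit]
  have hidx : (fun k : Nat => l[(2 * (k : Int)).toNat]?) = fun k : Nat => l[2 * k]? := by
    funext k
    have hk : (2 * (k : Int)).toNat = 2 * k := by omega
    rw [hk]
  rw [hidx, pvEvens_filterMap]

theorem pvSlice_odds {α : Type} (l : List α) :
    PySem.List.slice? l (some 1) none 2 = some (pvEvens l.tail) := by
  rw [PySem.List.slice?, PySem.List.sliceIndices]
  simp only [if_neg (by norm_num : ¬ (2:Int) = 0)]
  norm_num
  have hcnt : (if 1 < l.length then (((l.length : Int) - min 1 (l.length : Int) + 2 - 1) / 2).toNat else 0)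
      = (l.tail.length + 1) / 2 := by
    simp only [List.length_tail]
    split <;> omega
  rw [hcnt]
  have hidx : List.filterMap (fun k : Nat => l[(min 1 (l.length : Int) + 2 * (k : Int)).toNat]?)
        (List.range ((l.tail.length + 1) / 2))
      = List.filterMap (fun k : Nat => l.tail[2 * k]?) (List.range ((l.tail.length + 1) / 2)) := by
    apply List.filterMap_congr
    intro k hk
    rw [List.mem_range] at hk
    simp only [List.length_tail] at hk
    have hlen : 2 ≤ l.length := by omega
    have h1 : (min 1 (l.length : Int) + 2 * (k : Int)).toNat = (2 * k) + 1 := by omega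
    rw [h1, List.getElem?_tail]
  rw [hidx, pvEvens_filterMap]

theorem pvZip_evens {α : Type} (l : List α) :
    List.zip (pvEvens l) (pvEvens l.tail) = pvPairs l := by
  match l with
  | [] => simp [pvEvens_nil, pvPairs]
  | [x] => simp [pvEvens_nil, pvEvens_cons, pvPairs]
  | x :: y :: t =>
    have h1 : pvEvens (x :: y :: t) = x :: pvEvens t := by rw [pvEvens_cons, List.tail_cons]
    have h2 : pvEvens (x :: y :: t).tail = y :: pvEvens t.tail := by
      rw [List.tail_cons, pvEvens_cons]
    rw [h1, h2, List.zip_cons_cons, pvZip_evens t]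
    rfl
termination_by l.length

theorem pvRange_two_cons (a b : Int) (h : a < b) :
    PySem.List.pyRange a b 2 = a :: PySem.List.pyRange (a + 2) b 2 := by
  rw [PySem.List.pyRange_of_pos a b (by norm_num), PySem.List.pyRange_of_pos (a + 2) b (by norm_num),
      if_pos h]
  by_cases h2 : a + 2 < b
  · rw [if_pos h2]
    have hn : ((b - a + 2 - 1) / 2).toNat = ((b - (a + 2) + 2 - 1) / 2).toNat + 1 := by omega
    rw [hn, List.range_succ_eq_map, List.map_cons, List.map_map]
    norm_num
    intro k _
    omega
  · rw [if_neg h2]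
    have hn : ((b - a + 2 - 1) / 2).toNat = 1 := by omega
    rw [hn]
    simp

theorem pvRange_two_nil (a b : Int) (h : b ≤ a) : PySem.List.pyRange a b 2 = [] := by
  rw [PySem.List.pyRange_of_pos a b (by norm_num), if_neg (by omega)]
  simp

theorem pvLoopA (l : List String) (j : Nat) (acc : List (String × String)) :
    (PySem.List.pyRange (j : Int) (l.length : Int) 2).foldl (pvBodyA l) acc
      = acc ++ pvPairs (l.drop j) := by
  by_cases h : j < l.length
  · rw [pvRange_two_cons _ _ (by exact_mod_cast h), List.foldl_cons]
    have hget : PySem.List.pyGet? l (j : Int) = some l[j] := PySem.List.pyGet?_ofNat l j h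
    by_cases h1 : j + 1 < l.length
    · have hget1 : PySem.List.pyGet? l ((j : Int) + 1) = some l[j + 1] := by
        have := PySem.List.pyGet?_ofNat l (j + 1) h1
        rwa [show (((j + 1 : Nat)) : Int) = (j : Int) + 1 from by push_cast; ring] at this
      have hbody : pvBodyA l acc (j : Int) = acc ++ [(l[j], l[j + 1])] := by
        simp only [pvBodyA, hget, hget1,
          if_pos (show (j : Int) + 1 < (l.length : Int) by exact_mod_cast h1)]
      rw [hbody, show (j : Int) + 2 = ((j + 2 : Nat) : Int) from by omega,
          pvLoopA l (j + 2) (acc ++ [(l[j], l[j + 1])])]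
      rw [List.drop_eq_getElem_cons h, List.drop_eq_getElem_cons h1]
      simp [pvPairs]
    · have hbody : pvBodyA l acc (j : Int) = acc := by
        simp only [pvBodyA, hget,
          if_neg (show ¬ ((j : Int) + 1 < (l.length : Int)) by exact_mod_cast h1)]
      rw [hbody, pvRange_two_nil _ _ (by omega), List.foldl_nil]
      rw [List.drop_eq_getElem_cons h, show l.drop (j + 1) = [] from List.drop_eq_nil_of_le (by omega)]
      simp [pvPairs]
  · rw [pvRange_two_nil _ _ (by exact_mod_cast (by omega : l.length ≤ j)), List.foldl_nil,
        List.drop_eq_nil_of_le (by omega)]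
    simp [pvPairs]
termination_by l.length - j

-- ===== VERDICT (by name: the statement is the Claim_ definition above) =====
theorem parse_pokemon_move_spec : Claim_equal_parse_pokemon_move := by
  intro moves _
  unfold Spec_parse_pokemon_move parse_pokemon_move parse_pokemon_move_alt
  show (PySem.List.pyRange 0 ((((PySem.Str.split? moves ",").getD []).length : Int)) 2).foldl
      (pvBodyA ((PySem.Str.split? moves ",").getD [])) []
    = List.zip ((PySem.List.slice? ((PySem.Str.split? moves ",").getD []) none none 2).getD [])
        ((PySem.List.slice? ((PySem.Str.split? moves ",").getD []) (some 1) none 2).getD [])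
  generalize (PySem.Str.split? moves ",").getD [] = mal
  rw [pvSlice_evens, pvSlice_odds]
  simp only [Option.getD_some]
  have hA := pvLoopA mal 0 []
  norm_num at hA
  rw [hA, pvZip_evens]
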